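-- pv_equiv track=rewrite | github.com/JeanBaptisteServais/unsupervised-learning | apriori algorithme/apriori_algo.py | count
-- ===== SOURCE A (Python) =====
-- def count(data, command):
--     """Counting itemset"""
--
--     data_set = list(set(data))
--     dico = {i: 0 for i in data_set}
--
--     for i in data_set:
--         for co in command:
--             if sum([1 for j in i if j in co]) == len(i):
--                 dico[i] += 1
--     return dico
-- ===== SOURCE B (Python) =====
-- def count(data, command):
--     """Counting itemset"""
--
--     # Inverted index: element -> set of indices of commands containing it.
--     idx = {}
--     for k, co in enumerate(command):
--         for j in set(co):
--             idx.setdefault(j, set()).add(k)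
--
--     empty = set()
--     dico = {}
--     for i in set(data):
--         idxs = list(range(len(command)))
--         for j in set(i):
--             s = idx.get(j, empty)
--             idxs = [k for k in idxs if k in s]
--         dico[i] = len(idxs)
--     return dico
-- ===== Notes on version B (the rewrite author's own statement) =====
-- stated objective: faster
-- what changed: B builds an inverted index mapping each element to the set of command indices containing it, then counts each itemset by intersecting those index sets over the itemset's distinct elements, instead of A's per-itemset rescan of every command with a per-character linear substring scan.
import Mathlib
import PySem

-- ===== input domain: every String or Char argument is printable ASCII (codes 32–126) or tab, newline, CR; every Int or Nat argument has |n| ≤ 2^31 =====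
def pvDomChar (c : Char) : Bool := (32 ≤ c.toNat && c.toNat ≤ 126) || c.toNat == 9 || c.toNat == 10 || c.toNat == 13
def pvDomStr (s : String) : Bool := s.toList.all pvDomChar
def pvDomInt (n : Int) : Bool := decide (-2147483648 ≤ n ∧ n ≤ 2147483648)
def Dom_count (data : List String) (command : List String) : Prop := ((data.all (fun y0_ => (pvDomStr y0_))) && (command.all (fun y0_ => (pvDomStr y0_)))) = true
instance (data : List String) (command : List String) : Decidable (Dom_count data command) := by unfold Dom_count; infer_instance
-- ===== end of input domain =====

-- B replaces A's per-itemset rescan of every command by an inverted index (element -> set of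
-- command indices) intersected over the itemset's distinct elements; equal return value proved.

-- ===== PORT A =====
-- port of A's inner loops: for co in command: if sum([1 for j in i if j in co]) == len(i): dico[i] += 1
def countInner (i : String) (command : List String) (d : PySem.Dict String Int) : PySem.Dict String Int :=
  command.foldl (fun d co =>
    if ((i.toList.filter (fun j => co.toList.contains j)).map (fun _ => (1 : Int))).sum
        = PySem.Str.len i then
      d.insert i (d.getD i 0 + 1)
    else d) d

def count (data : List String) (command : List String) : List (String × Int) :=
  let dataSet := PySem.Set.ofList data
  let dico0 := dataSet.foldl (fun d i => d.insert i 0) PySem.Dict.empty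
  let dico := dataSet.foldl (fun d i => countInner i command d) dico0
  dico.items

-- ===== PORT B =====
-- port of: for k, co in enumerate(command): for j in set(co): idx.setdefault(j, set()).add(k)
def buildIdx (command : List String) : PySem.Dict Char (PySem.Set Int) :=
  (PySem.List.enumerate command).foldl (fun idx kc =>
    (PySem.Set.ofList kc.2.toList).foldl
      (fun idx j => idx.insert j (PySem.Set.add (idx.getD j PySem.Set.empty) kc.1)) idx)
    PySem.Dict.empty

-- port of: for i in set(data): idxs = list(range(len(command))); for j in set(i): idxs = [k for k in idxs if k in idx.get(j, empty)]; dico[i] = len(idxs)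
def count_alt (data : List String) (command : List String) : List (String × Int) :=
  let idx := buildIdx command
  let dico := (PySem.Set.ofList data).foldl (fun d i =>
      let idxs := (PySem.Set.ofList i.toList).foldl
        (fun idxs j => idxs.filter (fun k => PySem.Set.contains (idx.getD j PySem.Set.empty) k))
        (PySem.List.pyRange 0 (command.length : Int) 1)
      d.insert i ((idxs.length : Int))) PySem.Dict.empty
  dico.items

-- ===== PRECONDITION & SPEC =====
def Spec_count (data : List String) (command : List String) (out : List (String × Int)) : Prop := out = count_alt data command
instance (data : List String) (command : List String) (out : List (String × Int)) : Decidable (Spec_count data command out) := by unfold Spec_count; infer_instance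

-- ===== CLAIM (what is proved, stated in full; the proofs are below) =====
def Claim_equal_count : Prop := ∀ (data : List String) (command : List String), Dom_count data command → Spec_count data command (count data command)

-- ===== LEMMAS AND PROOFS =====

def condA (i : String) (co : String) : Bool :=
  ((i.toList.filter (fun j => co.toList.contains j)).map (fun _ => (1 : Int))).sum
    = PySem.Str.len i

def Pb (i co : String) : Bool := (PySem.Set.ofList i.toList).all (fun j => co.toList.contains j)

lemma condA_eq_P (i co : String) : condA i co = Pb i co := by
  rw [Bool.eq_iff_iff]
  simp only [condA, Pb, PySem.List.sum_map_const_int, PySem.Str.len_eq, List.all_eq_true,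
    PySem.Set.mem_ofList, decide_eq_true_eq, Int.mul_one]
  rw [Int.natCast_inj, List.length_filter_eq_length_iff]

lemma countInner_getD (i : String) (command : List String) :
    ∀ (d : PySem.Dict String Int) (v : String),
    (countInner i command d).getD v 0 =
      if v = i then d.getD v 0 + (command.countP (condA i) : Int) else d.getD v 0 := by
  induction command with
  | nil => intro d v; simp [countInner]
  | cons co rest ih =>
    intro d v
    simp only [countInner, List.foldl_cons] at *
    by_cases hc : condA i co
    · have hc' : (((i.toList.filter (fun j => co.toList.contains j)).map (fun _ => (1 : Int))).sum
        = PySem.Str.len i) := by simpa [condA] using hc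
      rw [if_pos hc', ih, List.countP_cons, PySem.Dict.getD_insert]
      by_cases hv : v = i <;> simp [hv, hc] <;> push_cast <;> ring
    · have hc' : ¬ (((i.toList.filter (fun j => co.toList.contains j)).map (fun _ => (1 : Int))).sum
        = PySem.Str.len i) := by simpa [condA] using hc
      rw [if_neg hc', ih, List.countP_cons]
      by_cases hv : v = i <;> simp [hv, hc]

lemma countInner_keys (i : String) (command : List String) (d : PySem.Dict String Int)
    (h : d.contains i = true) : (countInner i command d).keys = d.keys := by
  induction command generalizing d with
  | nil => simp [countInner]
  | cons co rest ih =>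
    simp only [countInner, List.foldl_cons] at *
    split_ifs with hc
    · rw [ih _ (by simp), PySem.Dict.keys_insert_of_contains _ _ h]
    · exact ih d h

lemma outer_keys (command : List String) :
    ∀ (l : List String) (d : PySem.Dict String Int), (∀ x ∈ l, d.contains x = true) →
    (l.foldl (fun d i => countInner i command d) d).keys = d.keys := by
  intro l
  induction l with
  | nil => intro d _; simp
  | cons i rest ih =>
    intro d h
    simp only [List.foldl_cons]
    have hk : (countInner i command d).keys = d.keys :=
      countInner_keys i command d (h i (by simp))
    rw [ih _ (fun x hx => ?_), hk]
    rw [PySem.Dict.contains_iff_mem_keys, hk, ← PySem.Dict.contains_iff_mem_keys]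
    exact h x (by simp [hx])

lemma outer_getD (command : List String) :
    ∀ (l : List String) (d : PySem.Dict String Int) (v : String), l.Nodup →
    (l.foldl (fun d i => countInner i command d) d).getD v 0 =
      d.getD v 0 + (if v ∈ l then (command.countP (condA v) : Int) else 0) := by
  intro l
  induction l with
  | nil => intro d v _; simp
  | cons i rest ih =>
    intro d v hnd
    simp only [List.foldl_cons]
    rw [ih _ _ hnd.of_cons, countInner_getD]
    by_cases hv : v = i
    · subst hv
      have : v ∉ rest := by simpa using (List.nodup_cons.mp hnd).1
      simp [this]
    · simp [hv, List.mem_cons]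

lemma init_getD :
    ∀ (l : List String) (d : PySem.Dict String Int) (v : String), d.getD v 0 = 0 →
    (l.foldl (fun d i => d.insert i 0) d).getD v 0 = 0 := by
  intro l
  induction l with
  | nil => intro d v h; simpa using h
  | cons i rest ih =>
    intro d v h
    simp only [List.foldl_cons]
    refine ih _ _ ?_
    rw [PySem.Dict.getD_insert]
    split_ifs <;> simp [h]

lemma count_eq (data command : List String) :
    (let dataSet := PySem.Set.ofList data
     let dico0 := dataSet.foldl (fun d i => d.insert i 0) PySem.Dict.empty
     let dico := dataSet.foldl (fun d i => countInner i command d) dico0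
     dico.items) =
    (PySem.Set.ofList data).map (fun i => (i, (command.countP (condA i) : Int))) := by
  have hnd : (PySem.Set.ofList data).Nodup := PySem.Set.nodup_ofList data
  have hkeys0 : ((PySem.Set.ofList data).foldl (fun d i => d.insert i (0 : Int))
      PySem.Dict.empty).keys = PySem.Set.ofList data := by
    rw [PySem.Dict.keys_foldl_insert (f := fun _ _ => (0 : Int))]
    simp only [PySem.Dict.keys_empty, PySem.Set.update_nil_left, PySem.Set.ofList_ofList]
  have hkeys : ((PySem.Set.ofList data).foldl (fun d i => countInner i command d)
      ((PySem.Set.ofList data).foldl (fun d i => d.insert i 0) PySem.Dict.empty)).keys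
      = PySem.Set.ofList data := by
    rw [outer_keys _ _ _ (fun x hx => by
      rw [PySem.Dict.contains_iff_mem_keys, hkeys0]; exact hx)]
    exact hkeys0
  simp only []
  rw [PySem.Dict.items_eq_map_keys _ (by rw [hkeys]; exact hnd) 0, hkeys]
  apply List.map_congr_left
  intro i hi
  rw [outer_getD _ _ _ _ hnd, init_getD _ _ _ (by simp), if_pos hi, zero_add]

def idxGet (command : List String) (j : Char) : List Int :=
  ((PySem.List.enumerate command).filter (fun kc => kc.2.toList.contains j)).map (·.1)

lemma idxStep_getD (k : Int) :
    ∀ (cs : List Char), cs.Nodup → ∀ (d : PySem.Dict Char (PySem.Set Int)) (j : Char),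
    (cs.foldl (fun idx j => idx.insert j (PySem.Set.add (idx.getD j PySem.Set.empty) k)) d).getD
        j PySem.Set.empty
      = if j ∈ cs then PySem.Set.add (d.getD j PySem.Set.empty) k
        else d.getD j PySem.Set.empty := by
  intro cs
  induction cs with
  | nil => intro _ d j; simp
  | cons c rest ih =>
    intro hnd d j
    simp only [List.foldl_cons]
    rw [ih hnd.of_cons]
    by_cases hjr : j ∈ rest
    · have hjc : j ≠ c := fun h => (by subst h; exact (List.nodup_cons.mp hnd).1 hjr)
      rw [if_pos hjr, if_pos (by simp [hjr]), PySem.Dict.getD_insert, if_neg hjc]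
    · rw [if_neg hjr, PySem.Dict.getD_insert]
      by_cases hjc : j = c
      · simp [hjc]
      · simp [hjc, hjr]

lemma buildIdx_go (j : Char) :
    ∀ (pairs : List (Int × String)) (d : PySem.Dict Char (PySem.Set Int)),
    (∀ (j' : Char), ∀ p ∈ pairs, p.1 ∉ d.getD j' PySem.Set.empty) →
    (pairs.map (·.1)).Nodup →
    (pairs.foldl (fun idx kc => (PySem.Set.ofList kc.2.toList).foldl
        (fun idx j => idx.insert j (PySem.Set.add (idx.getD j PySem.Set.empty) kc.1)) idx)
        d).getD j PySem.Set.empty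
      = d.getD j PySem.Set.empty
        ++ ((pairs.filter (fun kc => kc.2.toList.contains j)).map (·.1)) := by
  intro pairs
  induction pairs with
  | nil => intro d _ _; simp
  | cons kc rest ih =>
    intro d hfresh hnd
    simp only [List.foldl_cons]
    have hstep : ∀ j', ((PySem.Set.ofList kc.2.toList).foldl
        (fun idx j => idx.insert j (PySem.Set.add (idx.getD j PySem.Set.empty) kc.1)) d).getD
          j' PySem.Set.empty
        = if j' ∈ kc.2.toList then d.getD j' PySem.Set.empty ++ [kc.1]
          else d.getD j' PySem.Set.empty := by
      intro j'
      rw [idxStep_getD _ _ (PySem.Set.nodup_ofList _)]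
      by_cases hm : j' ∈ kc.2.toList
      · rw [if_pos (by simpa [PySem.Set.mem_ofList] using hm), if_pos hm]
        have hnotin : kc.1 ∉ d.getD j' PySem.Set.empty := hfresh j' kc (by simp)
        simp [PySem.Set.add, PySem.Set.contains_eq_listContains]
        intro hc
        exact absurd (by simpa using hc) hnotin
      · rw [if_neg (by simpa [PySem.Set.mem_ofList] using hm), if_neg hm]
    have hmapnd := hnd
    simp only [List.map_cons, List.nodup_cons] at hmapnd
    rw [ih _ ?_ hmapnd.2]
    · rw [hstep j, List.filter_cons]
      by_cases hm : kc.2.toList.contains j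
      · simp only [hm, if_pos, List.map_cons]
        rw [if_pos (by simpa using hm)]
        simp
      · simp only [hm]
        rw [if_neg (by simpa using hm)]
        simp
    · intro j' p hp
      rw [hstep j']
      have h1 : p.1 ∉ d.getD j' PySem.Set.empty := hfresh j' p (by simp [hp])
      have h2 : p.1 ≠ kc.1 := by
        intro h
        exact hmapnd.1 (h ▸ List.mem_map_of_mem hp)
      split_ifs with hmem
      · simp [h2]
        exact h1
      · exact h1

lemma buildIdx_getD (command : List String) (j : Char) :
    ((PySem.List.enumerate command).foldl (fun idx kc =>
      (PySem.Set.ofList kc.2.toList).foldl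
        (fun idx j => idx.insert j (PySem.Set.add (idx.getD j PySem.Set.empty) kc.1)) idx)
      PySem.Dict.empty).getD j PySem.Set.empty = idxGet command j := by
  rw [buildIdx_go j _ _ (by simp [PySem.Set.empty]) ?_]
  · simp [idxGet, PySem.Set.empty]
  · rw [PySem.List.map_fst_enumerate]
    exact PySem.List.nodup_pyRange_one _ _

lemma mem_idxGet_nat (command : List String) (j : Char) (m : Nat) (hm : m < command.length) :
    ((m : Int) ∈ idxGet command j) ↔ j ∈ command[m].toList := by
  simp only [idxGet, List.mem_map, List.mem_filter, PySem.List.mem_enumerate_iff]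
  constructor
  · rintro ⟨kc, ⟨⟨k, hk, rfl⟩, hc⟩, h1⟩
    simp only [zero_add, Int.natCast_inj] at h1
    subst h1
    simpa using hc
  · intro h
    exact ⟨((m : Int), command[m]), ⟨⟨m, hm, by simp⟩, by simpa using h⟩, rfl⟩

lemma filterFold {q : Char → Int → Bool} :
    ∀ (cs : List Char) (b : List Int),
    cs.foldl (fun idxs j => idxs.filter (q j)) b
      = b.filter (fun k => cs.all (fun j => q j k)) := by
  intro cs
  induction cs with
  | nil => intro b; simp
  | cons c rest ih =>
    intro b
    simp only [List.foldl_cons]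
    rw [ih, List.filter_filter]
    apply List.filter_congr
    intro k _
    simp [Bool.and_comm]


-- B's per-itemset value, with the index sets written out
def gB (command : List String) (i : String) : Int :=
  (((PySem.Set.ofList i.toList).foldl
      (fun idxs j => idxs.filter (fun k => PySem.Set.contains (idxGet command j) k))
      (PySem.List.pyRange 0 (command.length : Int) 1)).length : Int)

lemma buildIdx_getD' (command : List String) (j : Char) :
    (buildIdx command).getD j PySem.Set.empty = idxGet command j := by
  unfold buildIdx
  exact buildIdx_getD command j

lemma count_alt_eq (data command : List String) :
    count_alt data command = (PySem.Set.ofList data).map (fun i => (i, gB command i)) := by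
  unfold count_alt
  simp only [buildIdx_getD']
  rw [PySem.Dict.items_foldl_insert_fresh (PySem.Set.ofList data) (fun a => a)
      (fun i => (((PySem.Set.ofList i.toList).foldl
        (fun idxs j => idxs.filter (fun k => PySem.Set.contains (idxGet command j) k))
        (PySem.List.pyRange 0 (command.length : Int) 1)).length : Int))
      PySem.Dict.empty (by simp) (by simp [PySem.Set.nodup_ofList data])]
  simp [gB, PySem.Dict.empty]

lemma per_i (command : List String) (i : String) :
    gB command i = (command.countP (condA i) : Int) := by
  unfold gB
  rw [filterFold]
  rw [show (((PySem.List.pyRange 0 (command.length : Int) 1).filter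
      (fun k => (PySem.Set.ofList i.toList).all
        (fun j => PySem.Set.contains (idxGet command j) k))).length : Int)
    = (PySem.List.pyRange 0 (command.length : Int) 1).foldl
        (fun acc k => if (PySem.Set.ofList i.toList).all
          (fun j => PySem.Set.contains (idxGet command j) k) then acc + 1 else acc) 0 from by
      rw [PySem.List.foldl_if_add_one, ← List.countP_eq_length_filter, zero_add]]
  rw [PySem.List.foldl_congr_mem _ _
      (fun acc k => if Pb i (PySem.List.pyGetD command k "") then acc + 1 else acc) 0 ?_]
  · rw [PySem.List.foldl_pyRange_zero_pyGetD' command ""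
        (fun acc x => if Pb i x then acc + 1 else acc) 0]
    rw [PySem.List.foldl_if_add_one, zero_add]
    norm_cast
    exact List.countP_congr (fun co _ => by rw [condA_eq_P])
  · intro acc k hk
    rw [PySem.List.mem_pyRange_one] at hk
    obtain ⟨m, rfl⟩ := Int.eq_ofNat_of_zero_le hk.1
    have hm : m < command.length := by exact_mod_cast hk.2
    have heq : ((PySem.Set.ofList i.toList).all
        (fun j => PySem.Set.contains (idxGet command j) ((m : Nat) : Int)))
        = Pb i (PySem.List.pyGetD command ((m : Nat) : Int) "") := by
      rw [PySem.List.pyGetD_natCast, List.getD_eq_getElem _ _ hm, Bool.eq_iff_iff]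
      simp only [List.all_eq_true, Pb]
      constructor
      · intro h j hj
        have hc := h j hj
        rw [PySem.Set.contains_eq_listContains] at hc
        simpa using (mem_idxGet_nat command j m hm).mp (by simpa using hc)
      · intro h j hj
        rw [PySem.Set.contains_eq_listContains]
        simpa using (mem_idxGet_nat command j m hm).mpr (by simpa using h j hj)
    rw [heq]

lemma count_eq' (data command : List String) :
    count data command
      = (PySem.Set.ofList data).map (fun i => (i, (command.countP (condA i) : Int))) := by
  unfold count
  exact count_eq data command

-- ===== VERDICT (by name: the statement is the Claim_ definition above) =====
theorem count_spec : Claim_equal_count := by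
  intro data command _
  unfold Spec_count
  rw [count_eq', count_alt_eq]
  exact List.map_congr_left (fun i _ => by rw [per_i])
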